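-- pv_equiv track=rewrite | github.com/shivam1shah-bot/swe-agent | tests/integration/test_discover_routing_safety.py | _paths_match_suffix
-- ===== SOURCE A (Python) =====
-- def _paths_match_suffix(path: str, suffix: str) -> bool:
--     """Check if path ends with the given suffix pattern."""
--     path_parts = path.split("/")
--     suffix_parts = suffix.split("/")
--
--     if len(path_parts) < len(suffix_parts):
--         return False
--
--     # Compare from the end
--     for p_part, s_part in zip(reversed(path_parts), reversed(suffix_parts)):
--         if s_part.startswith("{") and p_part.startswith("{"):
--             continue  # Both parameterized
--         if s_part.startswith("{") or p_part.startswith("{"):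
--             return False  # One parameterized, one not
--         if p_part != s_part:
--             return False  # Literal mismatch
--
--     return True
-- ===== SOURCE B (Python) =====
-- def _paths_match_suffix(path: str, suffix: str) -> bool:
--     """Check if path ends with the given suffix pattern."""
--     # Peel one segment at a time from the right of the raw strings with
--     # rpartition; never build the full segment lists.
--     while True:
--         p_head, p_sep, p_part = path.rpartition("/")
--         s_head, s_sep, s_part = suffix.rpartition("/")
--         if p_part.startswith("{") != s_part.startswith("{"):
--             return False
--         if not p_part.startswith("{") and p_part != s_part:
--             return False
--         if not s_sep:
--             return True  # every suffix segment matched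
--         if not p_sep:
--             return False  # path has fewer segments than suffix
--         path, suffix = p_head, s_head
-- ===== Notes on version B (the rewrite author's own statement) =====
-- stated objective: alternative
-- what changed: Instead of splitting both strings into full segment lists, guarding on lengths and scanning zipped reversed lists, B peels one segment at a time from the right of the raw strings with rpartition and never materializes the segment lists; the length guard becomes 'path ran out of separators while suffix still has one'.
import Mathlib
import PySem

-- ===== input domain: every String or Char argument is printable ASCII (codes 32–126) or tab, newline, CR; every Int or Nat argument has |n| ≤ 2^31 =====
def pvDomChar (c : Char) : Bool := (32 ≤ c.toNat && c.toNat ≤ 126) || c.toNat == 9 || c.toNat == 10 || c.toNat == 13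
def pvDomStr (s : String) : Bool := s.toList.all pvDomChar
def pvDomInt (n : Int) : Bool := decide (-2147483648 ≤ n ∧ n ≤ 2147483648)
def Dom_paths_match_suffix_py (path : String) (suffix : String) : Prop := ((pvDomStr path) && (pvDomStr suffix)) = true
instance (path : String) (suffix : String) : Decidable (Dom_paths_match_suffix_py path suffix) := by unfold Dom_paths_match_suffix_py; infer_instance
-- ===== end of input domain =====

-- B replaces A's split-into-lists + length guard + scan over zipped reversed lists by peeling
-- one segment at a time from the right of the raw strings with rpartition, never building the
-- segment lists; objective: alternative (a different decomposition of similar cost).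

-- ===== PORT A =====
-- the for-loop over zip(reversed(path_parts), reversed(suffix_parts)) with its early returns
def pvLoopA : List (String × String) → Bool
  | [] => true
  | (p, s) :: rest =>
    if PySem.Str.startswith s "{" && PySem.Str.startswith p "{" then pvLoopA rest
    else if PySem.Str.startswith s "{" || PySem.Str.startswith p "{" then false
    else if p ≠ s then false
    else pvLoopA rest

def paths_match_suffix_py (path : String) (suffix : String) : Bool :=
  let path_parts := (PySem.Str.split? path "/").getD []  -- sep "/" ≠ "", so split? is some
  let suffix_parts := (PySem.Str.split? suffix "/").getD []
  if path_parts.length < suffix_parts.length then false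
  else pvLoopA (List.zip path_parts.reverse suffix_parts.reverse)

-- ===== PORT B =====
-- s.rpartition("/") ported by hand (PySem has no rpartition); exact for this single-char
-- separator: 'some (h, t)' means s = h ++ '/' :: t with no '/' in t, 'none' means no '/' in s
-- (Python's rpartition then yields head = "", sep = "" and part = s).
def pvRPart : List Char → Option (List Char × List Char)
  | [] => none
  | c :: rest =>
    match pvRPart rest with
    | some (h, t) => some (c :: h, t)
    | none => if c = '/' then some ([], rest) else none

-- termination measure for the peel loop (cited by pvAltGo's decreasing_by)
theorem pvRPart_length (l h t : List Char) (hl : pvRPart l = some (h, t)) : h.length < l.length := by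
  induction l generalizing h t with
  | nil => simp [pvRPart] at hl
  | cons c rest ih =>
    simp only [pvRPart] at hl
    cases hr : pvRPart rest with
    | some p =>
      obtain ⟨h', t'⟩ := p
      rw [hr] at hl
      obtain ⟨rfl, rfl⟩ := by simpa using hl
      have := ih h' t' hr
      simp; omega
    | none =>
      rw [hr] at hl
      by_cases hc : c = '/' <;> simp [hc] at hl
      obtain ⟨rfl, rfl⟩ := hl
      simp

-- the last segment (= rpartition's third component; the whole string when there is no '/')
def pvLastPart (l : List Char) : List Char :=
  match pvRPart l with
  | some (_, t) => t
  | none => l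

-- the two pair checks of one loop iteration of Source B (the two early 'return False's; fall through = true)
def pvPairOk (pp ss : List Char) : Bool :=
  if (PySem.Chars.startswith pp ['{'] != PySem.Chars.startswith ss ['{']) then false
  else if (!PySem.Chars.startswith pp ['{'] && pp ≠ ss) then false
  else true

-- the 'while True' peel loop of Source B, as tail recursion on the two strings
def pvAltGo (p s : List Char) : Bool :=
  match hs : pvRPart s with
  | none => pvPairOk (pvLastPart p) s          -- 'if not s_sep: return True' (after the pair checks)
  | some (sh, st) =>
    if pvPairOk (pvLastPart p) st = false then false
    else
      match pvRPart p with
      | none => false                          -- 'if not p_sep: return False'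
      | some (ph, _) => pvAltGo ph sh          -- 'path, suffix = p_head, s_head'
  termination_by s.length
  decreasing_by exact pvRPart_length _ _ _ hs

def paths_match_suffix_py_alt (path : String) (suffix : String) : Bool :=
  pvAltGo path.toList suffix.toList

-- ===== PRECONDITION & SPEC =====
def Spec_paths_match_suffix_py (path : String) (suffix : String) (out : Bool) : Prop := out = paths_match_suffix_py_alt path suffix
instance (path : String) (suffix : String) (out : Bool) : Decidable (Spec_paths_match_suffix_py path suffix out) := by unfold Spec_paths_match_suffix_py; infer_instance

-- ===== CLAIM (what is proved, stated in full; the proofs are below) =====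
def Claim_equal_paths_match_suffix_py : Prop := ∀ (path : String) (suffix : String), Dom_paths_match_suffix_py path suffix → Spec_paths_match_suffix_py path suffix (paths_match_suffix_py path suffix)

-- ===== LEMMAS AND PROOFS =====

-- structural model of splitting on '/'
def pvSp : List Char → List (List Char)
  | [] => [[]]
  | c :: rest => if c = '/' then [] :: pvSp rest else (pvSp rest).modifyHead (fun h => c :: h)

theorem pvSp_ne_nil (l : List Char) : pvSp l ≠ [] := by
  induction l with
  | nil => simp [pvSp]
  | cons c rest ih =>
    simp only [pvSp]
    split
    · simp
    · cases h : pvSp rest with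
      | nil => exact absurd h ih
      | cons a as => simp [h]

theorem pvGo_eq (fuel : Nat) : ∀ (l cur : List Char) (acc : List (List Char)), l.length ≤ fuel →
    PySem.Chars.splitOn.go ['/'] fuel l cur acc
      = acc.reverse ++ (pvSp l).modifyHead (fun h => cur.reverse ++ h) := by
  induction fuel with
  | zero =>
    intro l cur acc hl
    have : l = [] := by cases l <;> simp_all
    subst this
    simp [PySem.Chars.splitOn.go, pvSp]
  | succ f ih =>
    intro l cur acc hl
    cases l with
    | nil => simp [PySem.Chars.splitOn.go, pvSp]
    | cons c rest =>
      simp only [PySem.Chars.splitOn.go]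
      by_cases hc : c = '/'
      · subst hc
        have hpre : List.isPrefixOf ['/'] ('/' :: rest) = true := by simp [List.isPrefixOf]
        rw [if_pos hpre]
        rw [ih _ _ _ (by simpa using Nat.le_of_succ_le_succ hl)]
        cases h : pvSp rest with
        | nil => exact absurd h (pvSp_ne_nil rest)
        | cons a as => simp [pvSp, h]
      · have hpre : List.isPrefixOf ['/'] (c :: rest) = false := by
          simp [List.isPrefixOf]; exact fun h => hc h.symm
        rw [if_neg (by simp [hpre])]
        rw [ih _ _ _ (by simpa using Nat.le_of_succ_le_succ hl)]
        simp only [pvSp, if_neg hc]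
        cases h : pvSp rest with
        | nil => exact absurd h (pvSp_ne_nil rest)
        | cons a as => simp [h]

theorem splitOn_eq (l : List Char) : PySem.Chars.splitOn l ['/'] = pvSp l := by
  rw [PySem.Chars.splitOn, pvGo_eq _ _ _ _ (by omega)]
  cases h : pvSp l with
  | nil => exact absurd h (pvSp_ne_nil l)
  | cons a as => simp [h]

theorem pvRPart_none_sp (l : List Char) (hl : pvRPart l = none) : pvSp l = [l] := by
  induction l with
  | nil => simp [pvSp]
  | cons c rest ih =>
    simp only [pvRPart] at hl
    cases hr : pvRPart rest with
    | some p => rw [hr] at hl; cases p; simp at hl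
    | none =>
      rw [hr] at hl
      by_cases hc : c = '/' <;> simp [hc] at hl
      simp [pvSp, hc, ih hr]

theorem pvRPart_some_sp (l h t : List Char) (hl : pvRPart l = some (h, t)) :
    pvSp l = pvSp h ++ [t] := by
  induction l generalizing h t with
  | nil => simp [pvRPart] at hl
  | cons c rest ih =>
    simp only [pvRPart] at hl
    cases hr : pvRPart rest with
    | some p =>
      obtain ⟨h', t'⟩ := p
      rw [hr] at hl
      obtain ⟨rfl, rfl⟩ := by simpa using hl
      by_cases hc : c = '/'
      · simp [pvSp, hc, ih h' t' hr]
      · simp only [pvSp, if_neg hc, ih h' t' hr]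
        cases hsp : pvSp h' with
        | nil => exact absurd hsp (pvSp_ne_nil h')
        | cons a as => simp
    | none =>
      rw [hr] at hl
      by_cases hc : c = '/' <;> simp [hc] at hl
      obtain ⟨rfl, rfl⟩ := hl
      simp [pvSp, hc, pvRPart_none_sp rest hr]

-- char-list version of A's loop
def pvLA : List (List Char × List Char) → Bool
  | [] => true
  | (p, s) :: rest =>
    if PySem.Chars.startswith s ['{'] && PySem.Chars.startswith p ['{'] then pvLA rest
    else if PySem.Chars.startswith s ['{'] || PySem.Chars.startswith p ['{'] then false
    else if p ≠ s then false
    else pvLA rest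

-- one iteration of A's loop decides exactly B's pair check
theorem pvLA_cons (pp ss : List Char) (rest : List (List Char × List Char)) :
    pvLA ((pp, ss) :: rest) = (pvPairOk pp ss && pvLA rest) := by
  cases h1 : PySem.Chars.startswith pp ['{'] <;> cases h2 : PySem.Chars.startswith ss ['{'] <;>
    by_cases h3 : pp = ss <;> simp [pvLA, pvPairOk, h1, h2, h3]

theorem pvSp_reverse (p : List Char) :
    ∃ r, (pvSp p).reverse = pvLastPart p :: r := by
  unfold pvLastPart
  cases hp : pvRPart p with
  | none => exact ⟨[], by simp [pvRPart_none_sp p hp]⟩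
  | some q =>
    obtain ⟨h, t⟩ := q
    exact ⟨(pvSp h).reverse, by simp [pvRPart_some_sp p h t hp]⟩

-- B's peel loop computes A's guarded scan of the zipped reversed segment lists
theorem pvAltGo_eq (p s : List Char) :
    pvAltGo p s =
      (if (pvSp p).length < (pvSp s).length then false
       else pvLA (List.zip (pvSp p).reverse (pvSp s).reverse)) := by
  induction p, s using pvAltGo.induct with
  | case1 p s hs =>
    rw [pvAltGo, hs]
    simp only []
    obtain ⟨r, hr⟩ := pvSp_reverse p
    have h1 : pvSp s = [s] := pvRPart_none_sp s hs
    have hne : (pvSp p).length ≠ 0 := by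
      simpa using (List.length_pos_of_ne_nil (pvSp_ne_nil p)).ne'
    rw [h1, if_neg (by simp only [List.length_singleton]; omega)]
    simp [hr, pvLA_cons, pvLA]
  | case2 p s sh st hs hpair =>
    rw [pvAltGo, hs]; simp only []; rw [if_pos hpair]
    obtain ⟨r, hr⟩ := pvSp_reverse p
    have h1 : pvSp s = pvSp sh ++ [st] := pvRPart_some_sp s sh st hs
    split
    · rfl
    · rw [h1] at *
      have : (pvSp p).reverse.zip (pvSp sh ++ [st]).reverse
          = (pvLastPart p, st) :: r.zip (pvSp sh).reverse := by
        simp [hr]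
      rw [this, pvLA_cons]
      have : pvPairOk (pvLastPart p) st = false := hpair
      simp [this]
  | case3 p s sh st hs hpair hp =>
    rw [pvAltGo, hs]; simp only []; rw [if_neg hpair, hp]; simp only []
    have h1 : pvSp s = pvSp sh ++ [st] := pvRPart_some_sp s sh st hs
    have h2 : pvSp p = [p] := pvRPart_none_sp p hp
    have hne : (pvSp sh).length ≠ 0 := by
      simpa using (List.length_pos_of_ne_nil (pvSp_ne_nil sh)).ne'
    rw [h1, h2, if_pos (by simp only [List.length_singleton, List.length_append]; omega)]
  | case4 p s sh st hs hpair ph pt hp ih =>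
    rw [pvAltGo, hs]; simp only []; rw [if_neg hpair, hp]; simp only []
    have h1 : pvSp s = pvSp sh ++ [st] := pvRPart_some_sp s sh st hs
    have h2 : pvSp p = pvSp ph ++ [pt] := pvRPart_some_sp p ph pt hp
    have hlast : pvLastPart p = pt := by unfold pvLastPart; rw [hp]
    have hpair' : pvPairOk pt st = true := by
      rw [← hlast]; revert hpair; cases pvPairOk (pvLastPart p) st <;> simp
    rw [ih, h1, h2]
    simp only [List.length_append, List.length_singleton, List.reverse_append,
      List.reverse_singleton, List.singleton_append, List.zip_cons_cons, pvLA_cons,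
      hpair', Bool.true_and]
    by_cases hlt : (pvSp ph).length < (pvSp sh).length
    · rw [if_pos hlt, if_pos (by omega)]
    · rw [if_neg hlt, if_neg (by omega)]

-- A's loop over String pairs is pvLA over the underlying char lists
theorem pvLoopA_map (l : List (List Char × List Char)) :
    pvLoopA (l.map (Prod.map String.ofList String.ofList)) = pvLA l := by
  induction l with
  | nil => rfl
  | cons q rest ih =>
    obtain ⟨p, s⟩ := q
    have hb : ∀ cs : List Char, PySem.Str.startswith (String.ofList cs) "{" = PySem.Chars.startswith cs ['{'] := by
      intro cs; simp [PySem.Str.startswith]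
    have hinj : (String.ofList p = String.ofList s) ↔ p = s := by
      constructor
      · intro h; have := congrArg String.toList h; simpa using this
      · intro h; rw [h]
    simp only [List.map_cons, Prod.map, pvLoopA, pvLA, hb, ih]
    by_cases h3 : p = s
    · simp [h3]
    · simp [h3, hinj]

theorem split_eq (s : String) :
    (PySem.Str.split? s "/").getD [] = (pvSp s.toList).map String.ofList := by
  have h : ("/" : String).toList = ['/'] := rfl
  simp [PySem.Str.split?, PySem.Chars.split?, h, splitOn_eq]

-- ===== VERDICT (by name: the statement is the Claim_ definition above) =====
theorem paths_match_suffix_py_spec : Claim_equal_paths_match_suffix_py := by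
  intro path suffix _
  unfold Spec_paths_match_suffix_py paths_match_suffix_py paths_match_suffix_py_alt
  simp only [split_eq, pvAltGo_eq, List.length_map]
  rw [← List.map_reverse, ← List.map_reverse, List.zip_map, pvLoopA_map]
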